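-- pv_equiv track=rewrite | github.com/OscarBarreraGithub/cft-bootstrap | cft_bootstrap/el_showk_basis.py | get_derivative_indices
-- ===== SOURCE A (Python) =====
-- from typing import List, Tuple, Optional, Dict
--
-- def get_derivative_indices(nmax: int) -> List[Tuple[int, int]]:
--     """
--     Get all (m, n) pairs for the derivative basis.
--
--     The constraint is: m + 2n ≤ 2*nmax + 1, with m odd and m,n ≥ 0.
--
--     Args:
--         nmax: Maximum order parameter (paper uses nmax=10)
--
--     Returns:
--         List of (m, n) tuples sorted by total order
--     """
--     indices = []
--     max_constraint = 2 * nmax + 1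
--
--     for m in range(1, max_constraint + 1, 2):  # m = 1, 3, 5, ...
--         for n in range(0, (max_constraint - m) // 2 + 1):
--             if m + 2 * n <= max_constraint:
--                 indices.append((m, n))
--
--     # Sort by total order m + 2n, then by m
--     indices.sort(key=lambda x: (x[0] + 2 * x[1], x[0]))
--     return indices
-- ===== SOURCE B (Python) =====
-- def get_derivative_indices(nmax: int) -> list:
--     """Emit pairs in output order directly: walk the total order s = m + 2n
--     through odd values 1, 3, ..., 2*nmax+1 and, within each s, let m run over
--     odd values 1..s ascending with n = (s - m) // 2.  No sort needed."""
--     indices = []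
--     for s in range(1, 2 * nmax + 2, 2):
--         for m in range(1, s + 1, 2):
--             indices.append((m, (s - m) // 2))
--     return indices
-- ===== Notes on version B (the rewrite author's own statement) =====
-- stated objective: simpler
-- what changed: B iterates the total order s = m + 2n directly in increasing odd steps and emits (m, (s-m)//2) with m ascending inside each s, producing the list already in output order, so the grid enumeration, the always-true constraint test and the separate key-sort pass of A all disappear.
import Mathlib
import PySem

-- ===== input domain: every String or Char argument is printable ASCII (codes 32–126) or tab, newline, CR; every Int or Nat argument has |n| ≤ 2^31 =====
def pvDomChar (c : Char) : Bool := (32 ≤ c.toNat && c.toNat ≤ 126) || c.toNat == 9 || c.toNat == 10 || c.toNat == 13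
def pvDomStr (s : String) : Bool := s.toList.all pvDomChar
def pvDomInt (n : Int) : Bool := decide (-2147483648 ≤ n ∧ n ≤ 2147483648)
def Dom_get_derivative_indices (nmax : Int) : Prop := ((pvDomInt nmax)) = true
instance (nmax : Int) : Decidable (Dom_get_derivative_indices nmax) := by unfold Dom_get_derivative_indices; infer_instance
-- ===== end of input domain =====

-- B walks the total order s = m + 2n directly (odd s ascending, m ascending within s), so the
-- list comes out already in A's output order and A's separate sort pass disappears (simpler).


-- ===== PORT A =====
def get_derivative_indices (nmax : Int) : List (Int × Int) :=
  let max_constraint := 2 * nmax + 1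
  let indices :=
    (PySem.List.pyRange 1 (max_constraint + 1) 2).foldl (fun indices m =>
      (PySem.List.pyRange 0 (PySem.Int.floordiv (max_constraint - m) 2 + 1) 1).foldl
        (fun indices n =>
          if m + 2 * n ≤ max_constraint then indices ++ [(m, n)] else indices)
        indices)
      []
  -- Python's tuple-key sort: PySem.List.sorted2 with k1 = m + 2n, k2 = m
  PySem.List.sorted2 indices (fun x => x.1 + 2 * x.2) (fun x => x.1)

-- ===== PORT B =====
def get_derivative_indices_alt (nmax : Int) : List (Int × Int) :=
  (PySem.List.pyRange 1 (2 * nmax + 2) 2).foldl (fun indices s =>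
    (PySem.List.pyRange 1 (s + 1) 2).foldl
      (fun indices m => indices ++ [(m, PySem.Int.floordiv (s - m) 2)])
      indices)
    []

-- ===== PRECONDITION & SPEC =====
def Spec_get_derivative_indices (nmax : Int) (out : List (Int × Int)) : Prop := out = get_derivative_indices_alt nmax
instance (nmax : Int) (out : List (Int × Int)) : Decidable (Spec_get_derivative_indices nmax out) := by unfold Spec_get_derivative_indices; infer_instance

-- ===== CLAIM (what is proved, stated in full; the proofs are below) =====
def Claim_equal_get_derivative_indices : Prop := ∀ (nmax : Int), Dom_get_derivative_indices nmax → Spec_get_derivative_indices nmax (get_derivative_indices nmax)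

-- ===== LEMMAS AND PROOFS =====

-- the inner list A builds for a fixed m (all n with 0 ≤ n ≤ (N-m)//2)
def pvA (N m : Int) : List (Int × Int) :=
  (PySem.List.pyRange 0 (PySem.Int.floordiv (N - m) 2 + 1) 1).map (fun n => (m, n))

-- the inner list B builds for a fixed odd total s
def pvB (s : Int) : List (Int × Int) :=
  (PySem.List.pyRange 1 (s + 1) 2).map (fun m => (m, PySem.Int.floordiv (s - m) 2))

-- Python sorts by the tuple (m+2n, m); in Lean that key is the lexicographic product
def pvKey (x : Int × Int) : Lex (Int × Int) := toLex (x.1 + 2 * x.2, x.1)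

-- sorted2 with Int keys IS sorted with the lexicographic key
lemma pv_sorted2_eq_sorted_lex {α : Type} (xs : List α) (k1 k2 : α → Int) :
    PySem.List.sorted2 xs k1 k2 false
      = PySem.List.sorted xs (fun x => (toLex (k1 x, k2 x) : Lex (Int × Int))) false := by
  unfold PySem.List.sorted2 PySem.List.sorted
  simp only [Bool.false_eq_true, if_false]
  have h : (fun a b => decide (k1 a < k1 b) || (!decide (k1 b < k1 a) && decide (k2 a < k2 b)))
      = (fun a b => decide ((toLex (k1 a, k2 a) : Lex (Int × Int)) < toLex (k1 b, k2 b))) := by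
    funext a b
    rw [Bool.eq_iff_iff]
    simp only [Bool.or_eq_true, Bool.and_eq_true, Bool.not_eq_true', decide_eq_true_eq,
      decide_eq_false_iff_not, Prod.Lex.toLex_lt_toLex]
    omega
  rw [h]

-- any step-2 pyRange is strictly increasing
lemma pv_pairwise_pyRange2 (a b : Int) :
    (PySem.List.pyRange a b 2).Pairwise (· < ·) := by
  rw [PySem.List.pyRange_of_pos a b (by norm_num)]
  exact List.Pairwise.map _ (fun x y h => by omega) List.pairwise_lt_range

-- A's inner loop appends the whole pvA block (its guard is always true)
lemma pv_innerA (N m : Int) (acc : List (Int × Int)) :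
    (PySem.List.pyRange 0 (PySem.Int.floordiv (N - m) 2 + 1) 1).foldl
        (fun indices n => if m + 2 * n ≤ N then indices ++ [(m, n)] else indices) acc
      = acc ++ pvA N m := by
  have h := PySem.List.foldl_append_if (fun n => decide (m + 2 * n ≤ N))
      (fun n => ((m, n) : Int × Int)) (PySem.List.pyRange 0 (PySem.Int.floordiv (N - m) 2 + 1) 1) acc
  simp only [decide_eq_true_eq] at h
  rw [h, pvA, List.filter_eq_self.mpr]
  intro n hn
  rw [PySem.List.mem_pyRange_one] at hn
  have hb := PySem.Int.le_floordiv_iff_mul_le (a := N - m) (b := 2) (q := n) (by norm_num)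
  simp only [decide_eq_true_eq]
  omega

-- A's raw nested loop is the flatMap of the pvA blocks
lemma pv_rawA_eq (nmax : Int) :
    ((PySem.List.pyRange 1 (2 * nmax + 1 + 1) 2).foldl (fun indices m =>
      (PySem.List.pyRange 0 (PySem.Int.floordiv (2 * nmax + 1 - m) 2 + 1) 1).foldl
        (fun indices n =>
          if m + 2 * n ≤ 2 * nmax + 1 then indices ++ [(m, n)] else indices)
        indices) [])
      = (PySem.List.pyRange 1 (2 * nmax + 1 + 1) 2).flatMap (pvA (2 * nmax + 1)) := by
  rw [PySem.List.foldl_congr_mem _ _ (fun indices m => indices ++ pvA (2 * nmax + 1) m) _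
    (fun acc m _ => pv_innerA (2 * nmax + 1) m acc)]
  rw [PySem.List.foldl_append_eq_flatMap, List.nil_append]

-- B's nested loop is the flatMap of the pvB blocks
lemma pv_rawB_eq (nmax : Int) :
    get_derivative_indices_alt nmax
      = (PySem.List.pyRange 1 (2 * nmax + 2) 2).flatMap pvB := by
  unfold get_derivative_indices_alt
  rw [PySem.List.foldl_congr_mem _ _ (fun indices s => indices ++ pvB s) _
    (fun acc s _ => PySem.List.foldl_append_singleton_eq_map _ _ _)]
  rw [PySem.List.foldl_append_eq_flatMap, List.nil_append]

-- membership in A's raw list, characterised arithmetically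
lemma pv_mem_A (nmax : Int) (x : Int × Int) :
    x ∈ (PySem.List.pyRange 1 (2 * nmax + 1 + 1) 2).flatMap (pvA (2 * nmax + 1))
      ↔ 1 ≤ x.1 ∧ 0 ≤ x.2 ∧ x.1 + 2 * x.2 ≤ 2 * nmax + 1 ∧ (2 : Int) ∣ x.1 - 1 := by
  obtain ⟨p, q⟩ := x
  simp only [List.mem_flatMap, pvA, List.mem_map]
  constructor
  · rintro ⟨m, hm, n, hn, h⟩
    rw [PySem.List.mem_pyRange_iff_of_pos (by norm_num)] at hm
    rw [PySem.List.mem_pyRange_one] at hn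
    rw [Prod.mk.injEq] at h
    obtain ⟨rfl, rfl⟩ := h
    have hb := PySem.Int.le_floordiv_iff_mul_le (a := 2 * nmax + 1 - m) (b := 2) (q := n) (by norm_num)
    refine ⟨by omega, by omega, by omega, by omega⟩
  · rintro ⟨h1, h2, h3, h4⟩
    refine ⟨p, ?_, q, ?_, rfl⟩
    · rw [PySem.List.mem_pyRange_iff_of_pos (by norm_num)]; omega
    · rw [PySem.List.mem_pyRange_one]
      have hb := PySem.Int.le_floordiv_iff_mul_le (a := 2 * nmax + 1 - p) (b := 2) (q := q) (by norm_num)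
      omega

-- membership in B's list, the same characterisation
lemma pv_mem_B (nmax : Int) (x : Int × Int) :
    x ∈ (PySem.List.pyRange 1 (2 * nmax + 2) 2).flatMap pvB
      ↔ 1 ≤ x.1 ∧ 0 ≤ x.2 ∧ x.1 + 2 * x.2 ≤ 2 * nmax + 1 ∧ (2 : Int) ∣ x.1 - 1 := by
  obtain ⟨p, q⟩ := x
  simp only [List.mem_flatMap, pvB, List.mem_map]
  constructor
  · rintro ⟨s, hs, m, hm, h⟩
    rw [PySem.List.mem_pyRange_iff_of_pos (by norm_num)] at hs hm
    rw [Prod.mk.injEq] at h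
    obtain ⟨h5, hq⟩ := h
    have hmod : PySem.Int.mod (s - m) 2 = 0 :=
      (PySem.Int.mod_eq_zero_iff_dvd _ _).mpr (by omega)
    have hfd := PySem.Int.floordiv_mul_add_mod (s - m) 2
    refine ⟨by omega, by omega, by omega, by omega⟩
  · rintro ⟨h1, h2, h3, h4⟩
    refine ⟨p + 2 * q, ?_, p, ?_, ?_⟩
    · rw [PySem.List.mem_pyRange_iff_of_pos (by norm_num)]; omega
    · rw [PySem.List.mem_pyRange_iff_of_pos (by norm_num)]; omega
    · have he : p + 2 * q - p = 2 * q := by ring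
      have hq : PySem.Int.floordiv (2 * q) 2 = q :=
        (PySem.Int.floordiv_eq_iff_of_pos (by norm_num)).mpr ⟨by omega, by omega⟩
      rw [he, hq]

-- pairwise over a flatMap, from pairwise blocks, a pairwise outer list and a cross condition
lemma pv_pairwise_flatMap {α β : Type} {R : β → β → Prop} {S : α → α → Prop}
    (g : α → List β) (l : List α) (hl : l.Pairwise S)
    (hin : ∀ a ∈ l, (g a).Pairwise R)
    (hcross : ∀ a ∈ l, ∀ b ∈ l, S a b → ∀ x ∈ g a, ∀ y ∈ g b, R x y) :
    (l.flatMap g).Pairwise R := by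
  induction l with
  | nil => simp
  | cons a t ih =>
    rw [List.pairwise_cons] at hl
    simp only [List.flatMap_cons, List.pairwise_append]
    refine ⟨hin a (by simp), ih hl.2 (fun b hb => hin b (by simp [hb]))
        (fun b hb c hc hS => hcross b (by simp [hb]) c (by simp [hc]) hS), ?_⟩
    intro x hx y hy
    rcases List.mem_flatMap.mp hy with ⟨b, hb, hyb⟩
    exact hcross a (by simp) b (by simp [hb]) (hl.1 b hb) x hx y hyb

-- every element of pvB s (s odd) has total order exactly s
lemma pv_mem_pvB_sum {s : Int} (hs : (2 : Int) ∣ s - 1) {x : Int × Int} (hx : x ∈ pvB s) :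
    x.1 + 2 * x.2 = s := by
  rcases List.mem_map.mp hx with ⟨m, hm, rfl⟩
  rw [PySem.List.mem_pyRange_iff_of_pos (by norm_num)] at hm
  have hmod : PySem.Int.mod (s - m) 2 = 0 :=
    (PySem.Int.mod_eq_zero_iff_dvd _ _).mpr (by omega)
  have hfd := PySem.Int.floordiv_mul_add_mod (s - m) 2
  dsimp only
  omega

-- B's list is strictly increasing in the sort key
lemma pv_pairwise_B (nmax : Int) :
    ((PySem.List.pyRange 1 (2 * nmax + 2) 2).flatMap pvB).Pairwise
      (fun a b => pvKey a < pvKey b) := by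
  refine pv_pairwise_flatMap pvB _ (pv_pairwise_pyRange2 1 (2 * nmax + 2)) ?_ ?_
  · intro s hs
    rw [PySem.List.mem_pyRange_iff_of_pos (by norm_num)] at hs
    have hfst : (pvB s).Pairwise (fun a b => a.1 < b.1) :=
      List.Pairwise.map _ (fun x y h => by dsimp only; omega) (pv_pairwise_pyRange2 1 (s + 1))
    refine hfst.imp_of_mem (fun {x y} hx hy hlt => ?_)
    have hx' := pv_mem_pvB_sum (by omega) hx
    have hy' := pv_mem_pvB_sum (by omega) hy
    exact Prod.Lex.toLex_lt_toLex.mpr (Or.inr ⟨by omega, hlt⟩)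
  · intro s hs t ht hst x hx y hy
    rw [PySem.List.mem_pyRange_iff_of_pos (by norm_num)] at hs ht
    have hx' := pv_mem_pvB_sum (by omega) hx
    have hy' := pv_mem_pvB_sum (by omega) hy
    exact Prod.Lex.toLex_lt_toLex.mpr (Or.inl (by omega))

-- A's raw list is strictly increasing in the (m, n) lexicographic order (gives Nodup)
lemma pv_pairwise_A (nmax : Int) :
    ((PySem.List.pyRange 1 (2 * nmax + 1 + 1) 2).flatMap (pvA (2 * nmax + 1))).Pairwise
      (fun a b => (toLex a : Lex (Int × Int)) < toLex b) := by
  refine pv_pairwise_flatMap _ _ (pv_pairwise_pyRange2 1 (2 * nmax + 1 + 1)) ?_ ?_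
  · intro m _
    exact List.Pairwise.map _
      (fun x y h => Prod.Lex.toLex_lt_toLex.mpr (Or.inr ⟨rfl, h⟩))
      (PySem.List.pairwise_lt_pyRange_one 0 (PySem.Int.floordiv (2 * nmax + 1 - m) 2 + 1))
  · intro m _ m' _ hmm x hx y hy
    rcases List.mem_map.mp hx with ⟨n, _, rfl⟩
    rcases List.mem_map.mp hy with ⟨n', _, rfl⟩
    exact Prod.Lex.toLex_lt_toLex.mpr (Or.inl hmm)

lemma pv_perm (nmax : Int) :
    ((PySem.List.pyRange 1 (2 * nmax + 2) 2).flatMap pvB).Perm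
      ((PySem.List.pyRange 1 (2 * nmax + 1 + 1) 2).flatMap (pvA (2 * nmax + 1))) := by
  have hndB : ((PySem.List.pyRange 1 (2 * nmax + 2) 2).flatMap pvB).Nodup :=
    (pv_pairwise_B nmax).imp (fun {a b} h => by rintro rfl; exact lt_irrefl _ h)
  have hndA : ((PySem.List.pyRange 1 (2 * nmax + 1 + 1) 2).flatMap (pvA (2 * nmax + 1))).Nodup :=
    (pv_pairwise_A nmax).imp (fun {a b} h => by rintro rfl; exact lt_irrefl _ h)
  refine List.perm_of_nodup_nodup_toFinset_eq hndB hndA ?_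
  ext x
  simp only [List.mem_toFinset, pv_mem_A, pv_mem_B]

-- ===== VERDICT (by name: the statement is the Claim_ definition above) =====
theorem get_derivative_indices_spec : Claim_equal_get_derivative_indices := by
  intro nmax _
  unfold Spec_get_derivative_indices get_derivative_indices
  simp only []
  rw [pv_rawA_eq, pv_sorted2_eq_sorted_lex, pv_rawB_eq]
  exact PySem.List.sorted_eq_of_perm_of_pairwise_lt _ _ pvKey (pv_perm nmax) (pv_pairwise_B nmax)
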